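-- pv_equiv track=rewrite | github.com/PanDAWMS/panda-bigmon-core | core/art/utils.py | get_result_for_multijob_test
-- ===== SOURCE A (Python) =====
-- def get_result_for_multijob_test(states):
--     """Return worst final result for a test that has several PanDA jobs"""
--     result = None
--     state_dict = {
--         'active': 0,
--         'failed': 1,
--         'finished': 2,
--         'succeeded': 3,
--     }
--
--     result_index = min([state_dict[s] for s in list(set(states)) if s in state_dict])
--     result = list(state_dict.keys())[result_index] if result_index < len(state_dict) else None
--
--     return result
-- ===== SOURCE B (Python) =====
-- def get_result_for_multijob_test(states):
--     """Return worst final result for a test that has several PanDA jobs"""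
--     present = set(states)
--     for name in ('active', 'failed', 'finished', 'succeeded'):
--         if name in present:
--             return name
--     return None
-- ===== Notes on version B (the rewrite author's own statement) =====
-- stated objective: idiomatic
-- what changed: B replaces A's 'map every state to an index, take min of the index list, index back into the dict's key list' with a direct scan of the fixed priority-ordered tuple returning the first name present in set(states).
import Mathlib
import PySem

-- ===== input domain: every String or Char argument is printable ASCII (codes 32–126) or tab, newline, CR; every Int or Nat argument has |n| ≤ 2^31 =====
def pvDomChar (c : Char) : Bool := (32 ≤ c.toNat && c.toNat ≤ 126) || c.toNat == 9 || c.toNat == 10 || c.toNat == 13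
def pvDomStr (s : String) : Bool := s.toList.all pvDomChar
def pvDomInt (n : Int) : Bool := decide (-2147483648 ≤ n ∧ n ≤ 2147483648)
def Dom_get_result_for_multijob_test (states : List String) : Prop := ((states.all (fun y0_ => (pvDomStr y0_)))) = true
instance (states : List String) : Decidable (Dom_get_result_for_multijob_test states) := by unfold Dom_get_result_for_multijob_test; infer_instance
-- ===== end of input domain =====

-- B scans the fixed priority-ordered list and returns the first name present in set(states),
-- instead of A's map-to-index / min / index-back-into-keys; objective: idiomatic. Where A raises
-- (no known state present, excluded by Pre_) B's Python returns None.

-- ===== PORT A =====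
def get_result_for_multijob_test (states : List String) : Option String :=
  let state_dict : PySem.Dict String Int :=
    PySem.Dict.ofList [("active", 0), ("failed", 1), ("finished", 2), ("succeeded", 3)]
  let candidates : List Int :=
    ((PySem.Set.ofList states).filter (fun s => state_dict.contains s)).map
      (fun s => state_dict.getD s 0)
  match PySem.List.min? candidates (fun x => x) with
  | none => none  -- Python raises ValueError (min of empty sequence) here; excluded by Pre_
  | some result_index =>
      if result_index < (state_dict.size : Int) then
        PySem.List.pyGet? state_dict.keys result_index  -- always in range in this branch
      else none

-- ===== PORT B =====
def get_result_for_multijob_test_alt (states : List String) : Option String :=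
  let present : PySem.Set String := PySem.Set.ofList states
  ["active", "failed", "finished", "succeeded"].find? (fun name => PySem.Set.contains present name)

-- ===== PRECONDITION & SPEC =====
-- Pre_ excludes exactly the inputs on which A raises ValueError: lists containing none of the
-- four known state names (min() of an empty sequence).
def Pre_get_result_for_multijob_test (states : List String) : Prop :=
  "active" ∈ states ∨ "failed" ∈ states ∨ "finished" ∈ states ∨ "succeeded" ∈ states
instance (states : List String) : Decidable (Pre_get_result_for_multijob_test states) := by
  unfold Pre_get_result_for_multijob_test; infer_instance
def pvWitness_get_result_for_multijob_test : List String := ["failed", "succeeded"]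

def Spec_get_result_for_multijob_test (states : List String) (out : Option String) : Prop :=
  out = get_result_for_multijob_test_alt states
instance (states : List String) (out : Option String) :
    Decidable (Spec_get_result_for_multijob_test states out) := by
  unfold Spec_get_result_for_multijob_test; infer_instance

-- ===== CLAIM (what is proved, stated in full; the proofs are below) =====
def Claim_equal_get_result_for_multijob_test : Prop :=
  ∀ (states : List String), Dom_get_result_for_multijob_test states →
    Pre_get_result_for_multijob_test states →
    Spec_get_result_for_multijob_test states (get_result_for_multijob_test states)

-- ===== LEMMAS AND PROOFS =====

-- A's candidate list contains exactly the indices of the known states that occur in `states`.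
lemma mem_candidates (states : List String) (i : Int) :
    i ∈ (((PySem.Set.ofList states).filter
          (fun s => (PySem.Dict.ofList
            [("active", (0:Int)), ("failed", 1), ("finished", 2), ("succeeded", 3)]).contains s)).map
          (fun s => (PySem.Dict.ofList
            [("active", (0:Int)), ("failed", 1), ("finished", 2), ("succeeded", 3)]).getD s 0)) ↔
    ((i = 0 ∧ "active" ∈ states) ∨ (i = 1 ∧ "failed" ∈ states) ∨
     (i = 2 ∧ "finished" ∈ states) ∨ (i = 3 ∧ "succeeded" ∈ states)) := by
  have hd : (PySem.Dict.ofList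
      [("active", (0:Int)), ("failed", 1), ("finished", 2), ("succeeded", 3)]) =
      PySem.Dict.mk [("active", 0), ("failed", 1), ("finished", 2), ("succeeded", 3)] := by decide
  simp only [List.mem_map, List.mem_filter]
  constructor
  · rintro ⟨s, ⟨hs, hc⟩, rfl⟩
    rw [PySem.Set.mem_ofList] at hs
    rw [hd] at hc
    have : s = "active" ∨ s = "failed" ∨ s = "finished" ∨ s = "succeeded" := by
      simp at hc
      tauto
    rcases this with rfl | rfl | rfl | rfl
    · exact Or.inl ⟨by decide, hs⟩
    · exact Or.inr (Or.inl ⟨by decide, hs⟩)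
    · exact Or.inr (Or.inr (Or.inl ⟨by decide, hs⟩))
    · exact Or.inr (Or.inr (Or.inr ⟨by decide, hs⟩))
  · rintro (⟨rfl, h⟩ | ⟨rfl, h⟩ | ⟨rfl, h⟩ | ⟨rfl, h⟩)
    · exact ⟨"active", ⟨(PySem.Set.mem_ofList _ _).2 h, by decide⟩, by decide⟩
    · exact ⟨"failed", ⟨(PySem.Set.mem_ofList _ _).2 h, by decide⟩, by decide⟩
    · exact ⟨"finished", ⟨(PySem.Set.mem_ofList _ _).2 h, by decide⟩, by decide⟩
    · exact ⟨"succeeded", ⟨(PySem.Set.mem_ofList _ _).2 h, by decide⟩, by decide⟩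

-- min with identity key of a list that contains k and whose elements are all ≥ k is k
lemma min?_id_eq_of (l : List Int) (k : Int) (hk : k ∈ l) (hlo : ∀ y ∈ l, k ≤ y) :
    PySem.List.min? l (fun x => x) = some k := by
  cases h : PySem.List.min? l (fun x => x) with
  | none =>
      rw [PySem.List.min?_eq_none_iff] at h
      subst h; cases hk
  | some m =>
      have hm := PySem.List.min?_mem h
      have h1 : m ≤ k := PySem.List.min?_isMin h k hk
      have h2 : k ≤ m := hlo m hm
      rw [le_antisymm h1 h2]

lemma result_eq (states : List String) (k : Int) (hk0 : 0 ≤ k) (hk3 : k ≤ 3)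
    (hmin : PySem.List.min? (((PySem.Set.ofList states).filter
          (fun s => (PySem.Dict.ofList
            [("active", (0:Int)), ("failed", 1), ("finished", 2), ("succeeded", 3)]).contains s)).map
          (fun s => (PySem.Dict.ofList
            [("active", (0:Int)), ("failed", 1), ("finished", 2), ("succeeded", 3)]).getD s 0))
          (fun x => x) = some k) :
    get_result_for_multijob_test states =
      PySem.List.pyGet? ["active", "failed", "finished", "succeeded"] k := by
  unfold get_result_for_multijob_test
  simp only []
  rw [hmin]
  have hkeys : (PySem.Dict.ofList
      [("active", (0:Int)), ("failed", 1), ("finished", 2), ("succeeded", 3)]).keys =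
      ["active", "failed", "finished", "succeeded"] := by decide
  show (if k < ((PySem.Dict.ofList
      [("active", (0:Int)), ("failed", 1), ("finished", 2), ("succeeded", 3)]).size : Int) then
      PySem.List.pyGet? (PySem.Dict.ofList
      [("active", (0:Int)), ("failed", 1), ("finished", 2), ("succeeded", 3)]).keys k
    else none) = _
  rw [hkeys, show ((PySem.Dict.ofList
      [("active", (0:Int)), ("failed", 1), ("finished", 2), ("succeeded", 3)]).size : Int) = 4
      from by decide, if_pos (by omega)]

-- ===== VERDICT (by name: the statement is the Claim_ definition above) =====
theorem get_result_for_multijob_test_spec : Claim_equal_get_result_for_multijob_test := by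
  unfold Claim_equal_get_result_for_multijob_test
  intro states _ hpre
  unfold Spec_get_result_for_multijob_test
  set cands := (((PySem.Set.ofList states).filter
          (fun s => (PySem.Dict.ofList
            [("active", (0:Int)), ("failed", 1), ("finished", 2), ("succeeded", 3)]).contains s)).map
          (fun s => (PySem.Dict.ofList
            [("active", (0:Int)), ("failed", 1), ("finished", 2), ("succeeded", 3)]).getD s 0)) with hc
  have hmemc : ∀ i : Int, i ∈ cands ↔
      ((i = 0 ∧ "active" ∈ states) ∨ (i = 1 ∧ "failed" ∈ states) ∨
       (i = 2 ∧ "finished" ∈ states) ∨ (i = 3 ∧ "succeeded" ∈ states)) := by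
    intro i; rw [hc]; exact mem_candidates states i
  unfold get_result_for_multijob_test_alt
  by_cases ha : "active" ∈ states
  · have hmin : PySem.List.min? cands (fun x => x) = some 0 := by
      refine min?_id_eq_of _ _ ((hmemc 0).2 (Or.inl ⟨rfl, ha⟩)) ?_
      intro y hy; rcases (hmemc y).1 hy with ⟨rfl,_⟩|⟨rfl,_⟩|⟨rfl,_⟩|⟨rfl,_⟩ <;> omega
    rw [result_eq states 0 (by omega) (by omega) (hc ▸ hmin)]
    simp [List.find?, ha, PySem.List.pyGet?, PySem.List.pyIdx?]
  · by_cases hf : "failed" ∈ states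
    · have hmin : PySem.List.min? cands (fun x => x) = some 1 := by
        refine min?_id_eq_of _ _ ((hmemc 1).2 (Or.inr (Or.inl ⟨rfl, hf⟩))) ?_
        intro y hy
        rcases (hmemc y).1 hy with ⟨rfl,h⟩|⟨rfl,_⟩|⟨rfl,_⟩|⟨rfl,_⟩
        · exact absurd h ha
        all_goals omega
      rw [result_eq states 1 (by omega) (by omega) (hc ▸ hmin)]
      simp [List.find?, ha, hf, PySem.List.pyGet?, PySem.List.pyIdx?]
    · by_cases hn : "finished" ∈ states
      · have hmin : PySem.List.min? cands (fun x => x) = some 2 := by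
          refine min?_id_eq_of _ _ ((hmemc 2).2 (Or.inr (Or.inr (Or.inl ⟨rfl, hn⟩)))) ?_
          intro y hy
          rcases (hmemc y).1 hy with ⟨rfl,h⟩|⟨rfl,h⟩|⟨rfl,_⟩|⟨rfl,_⟩
          · exact absurd h ha
          · exact absurd h hf
          all_goals omega
        rw [result_eq states 2 (by omega) (by omega) (hc ▸ hmin)]
        simp [List.find?, ha, hf, hn, PySem.List.pyGet?, PySem.List.pyIdx?]
      · have hs : "succeeded" ∈ states := by
          rcases hpre with h|h|h|h
          · exact absurd h ha
          · exact absurd h hf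
          · exact absurd h hn
          · exact h
        have hmin : PySem.List.min? cands (fun x => x) = some 3 := by
          refine min?_id_eq_of _ _ ((hmemc 3).2 (Or.inr (Or.inr (Or.inr ⟨rfl, hs⟩)))) ?_
          intro y hy
          rcases (hmemc y).1 hy with ⟨rfl,h⟩|⟨rfl,h⟩|⟨rfl,h⟩|⟨rfl,_⟩
          · exact absurd h ha
          · exact absurd h hf
          · exact absurd h hn
          · omega
        rw [result_eq states 3 (by omega) (by omega) (hc ▸ hmin)]
        simp [List.find?, ha, hf, hn, hs, PySem.List.pyGet?, PySem.List.pyIdx?]
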